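-- pv_equiv track=rewrite | github.com/YangLuGitHub/Euler | src/scripts/Problem28.py | make_boxes
-- ===== SOURCE A (Python) =====
-- def make_boxes(size_max):
--     last = 1
--     next_box_sum = 1
--     side_length = 0
--     while side_length <= size_max:
--         yield next_box_sum
--         side_length += 2
--         next_box_sum = 4 * last + 10 * side_length
--         last += side_length * 4
-- ===== SOURCE B (Python) =====
-- def make_boxes(size_max):
--     k = 0
--     while 2 * k <= size_max:
--         s = 2 * k + 1
--         yield 1 if k == 0 else 4 * s * s - 6 * s + 6
--         k += 1
-- ===== Notes on version B (the rewrite author's own statement) =====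
-- stated objective: simpler
-- what changed: B drops A's running accumulators (last, next_box_sum) and yields each ring's corner sum directly from its ring index via the closed form 4*s*s-6*s+6 with s=2*k+1 (1 for the center ring k=0).
import Mathlib
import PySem

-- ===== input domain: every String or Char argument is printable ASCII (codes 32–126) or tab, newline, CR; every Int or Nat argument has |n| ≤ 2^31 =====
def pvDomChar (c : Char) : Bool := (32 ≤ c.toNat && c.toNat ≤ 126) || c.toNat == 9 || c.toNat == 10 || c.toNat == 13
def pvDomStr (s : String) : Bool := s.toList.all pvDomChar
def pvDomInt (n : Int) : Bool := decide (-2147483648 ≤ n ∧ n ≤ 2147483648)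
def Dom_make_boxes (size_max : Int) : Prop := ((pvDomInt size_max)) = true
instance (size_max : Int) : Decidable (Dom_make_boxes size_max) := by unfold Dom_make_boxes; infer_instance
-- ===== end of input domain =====

-- B replaces A's running accumulators with the closed-form ring corner sum derived from the ring index (simpler).


-- ===== PORT A =====
-- A's while loop over the state (last, next_box_sum, side_length); yields collected into a list.
def make_boxes_loop (size_max last next_box_sum side_length : Int) : List Int :=
  if side_length ≤ size_max then
    next_box_sum ::
      make_boxes_loop size_max (last + (side_length + 2) * 4)
        (4 * last + 10 * (side_length + 2)) (side_length + 2)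
  else []
termination_by (size_max + 1 - side_length).toNat
decreasing_by omega

def make_boxes (size_max : Int) : List Int :=
  make_boxes_loop size_max 1 1 0

-- ===== PORT B =====
-- B's while loop over the ring index k; each element is computed from k directly.
def make_boxes_alt_loop (size_max k : Int) : List Int :=
  if 2 * k ≤ size_max then
    (if k = 0 then 1 else 4 * (2 * k + 1) * (2 * k + 1) - 6 * (2 * k + 1) + 6) ::
      make_boxes_alt_loop size_max (k + 1)
  else []
termination_by (size_max + 1 - 2 * k).toNat
decreasing_by omega

def make_boxes_alt (size_max : Int) : List Int :=
  make_boxes_alt_loop size_max 0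

-- ===== PRECONDITION & SPEC =====
def Spec_make_boxes (size_max : Int) (out : List Int) : Prop := out = make_boxes_alt size_max
instance (size_max : Int) (out : List Int) : Decidable (Spec_make_boxes size_max out) := by unfold Spec_make_boxes; infer_instance

-- ===== CLAIM (what is proved, stated in full; the proofs are below) =====
def Claim_equal_make_boxes : Prop := ∀ (size_max : Int), Dom_make_boxes size_max → Spec_make_boxes size_max (make_boxes size_max)

-- ===== LEMMAS AND PROOFS =====

-- Invariant: after k ≥ 1 iterations A's state is last = 1+4k(k+1), next = 16k²+4k+4, side = 2k,
-- and from there the loops agree.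
theorem make_boxes_agree (n : Nat) :
    ∀ (size_max k : Int), 1 ≤ k → (size_max + 1 - 2 * k).toNat ≤ n →
      make_boxes_loop size_max (1 + 4 * k * (k + 1)) (16 * k * k + 4 * k + 4) (2 * k) =
        make_boxes_alt_loop size_max k := by
  induction n with
  | zero =>
    intro size_max k hk hn
    rw [make_boxes_loop, make_boxes_alt_loop]
    rw [if_neg (by omega), if_neg (by omega)]
  | succ m ih =>
    intro size_max k hk hn
    rw [make_boxes_loop, make_boxes_alt_loop]
    by_cases h : 2 * k ≤ size_max
    · rw [if_pos h, if_pos h, if_neg (by omega)]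
      have hhead : 16 * k * k + 4 * k + 4 =
          4 * (2 * k + 1) * (2 * k + 1) - 6 * (2 * k + 1) + 6 := by ring
      rw [hhead]
      congr 1
      have h1 : 1 + 4 * k * (k + 1) + (2 * k + 2) * 4 = 1 + 4 * (k + 1) * ((k + 1) + 1) := by ring
      have h2 : 4 * (1 + 4 * k * (k + 1)) + 10 * (2 * k + 2) =
          16 * (k + 1) * (k + 1) + 4 * (k + 1) + 4 := by ring
      have h3 : (2 * k + 2 : Int) = 2 * (k + 1) := by ring
      rw [h1, h2, h3]
      exact ih size_max (k + 1) (by omega) (by omega)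
    · rw [if_neg (by omega), if_neg h]

-- ===== VERDICT (by name: the statement is the Claim_ definition above) =====
theorem make_boxes_spec : Claim_equal_make_boxes := by
  intro size_max _
  unfold Spec_make_boxes make_boxes make_boxes_alt
  rw [make_boxes_loop, make_boxes_alt_loop]
  by_cases h : (0 : Int) ≤ size_max
  · rw [if_pos h, if_pos (by omega), if_pos rfl]
    congr 1
    have := make_boxes_agree (size_max + 1).toNat size_max 1 (by omega) (by omega)
    simpa using this
  · rw [if_neg h, if_neg (by omega)]
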